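-- pv_equiv track=rewrite | github.com/actank/new_words_find | oov.py | get_3_gram
-- ===== SOURCE A (Python) =====
-- origin_freq = {}
--
-- def get_3_gram(l):
--     ll = []
--     i = 3
--     while i >= 0:
--         if len(l) < i:
--             i = i - 1
--             continue
--         for j in range(len(l) - i):
--             s = l[j]
--             for k in range(j + 1,j + i + 1):
--                 s = s + "#" + l[k]
--             if s not in ll:
--                 ll.append(s)
--                 if s not in origin_freq:
--                     origin_freq.setdefault(s, 1)
--                 else:
--                     origin_freq[s] += 1
--         i = i - 1
--     return ll
-- ===== SOURCE B (Python) =====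
-- origin_freq = {}
--
-- def get_3_gram(l):
--     # dynamic programming: each longer gram extends the previous layer's gram by one element
--     layers = [list(l)]
--     for size in (2, 3, 4):
--         prev = layers[-1]
--         layers.append([g + "#" + x for g, x in zip(prev, l[size - 1:])])
--     ll = list(dict.fromkeys(g for layer in reversed(layers) for g in layer))
--     for s in ll:
--         origin_freq[s] = origin_freq.get(s, 0) + 1
--     return ll
-- ===== Notes on version B (the rewrite author's own statement) =====
-- stated objective: faster
-- what changed: Instead of rebuilding every gram from scratch with nested index loops and a linear 's not in ll' scan per gram, B computes grams by dynamic programming - each size-k layer extends the size-(k-1) layer's grams by one element via zip - then dedups the concatenated layers once with dict.fromkeys and updates origin_freq in a final separate loop.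
import Mathlib
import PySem

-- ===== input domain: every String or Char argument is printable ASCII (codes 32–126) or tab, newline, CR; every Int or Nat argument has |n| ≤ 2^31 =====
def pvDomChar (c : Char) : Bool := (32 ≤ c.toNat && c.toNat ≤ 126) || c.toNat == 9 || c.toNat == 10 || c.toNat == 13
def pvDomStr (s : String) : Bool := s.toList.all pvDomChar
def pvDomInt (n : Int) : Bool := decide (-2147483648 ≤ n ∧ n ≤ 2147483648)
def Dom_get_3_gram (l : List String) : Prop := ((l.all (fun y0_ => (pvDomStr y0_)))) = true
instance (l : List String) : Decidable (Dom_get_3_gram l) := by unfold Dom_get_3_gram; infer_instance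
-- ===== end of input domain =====

-- B computes the grams by dynamic programming (each size-k layer extends the size-(k-1) layer's
-- grams by one element via zip) and dedups the concatenated layers once with dict.fromkeys,
-- instead of A's nested index loops with a linear `s not in ll` scan per gram.
-- Both A and B update the module-global origin_freq identically; the equivalence proved here is
-- about the RETURN value (the global dict is a side effect outside the ported signature).

-- ===== PORT A =====
def get_3_gram (l : List String) : List String :=
  let loop := fun (ll : List String) (i : Int) =>
    if (l.length : Int) < i then ll
    else
      (PySem.List.pyRange 0 ((l.length : Int) - i) 1).foldl (fun ll j =>
        let s := (PySem.List.pyRange (j + 1) (j + i + 1) 1).foldl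
          (fun s k => s ++ "#" ++ PySem.List.pyGetD l k "")
          (PySem.List.pyGetD l j "")
        if ll.contains s then ll else ll ++ [s]) ll
  [(3 : Int), 2, 1, 0].foldl loop []

-- ===== PORT B =====
def get_3_gram_alt (l : List String) : List String :=
  let layers := [(2 : Int), 3, 4].foldl (fun layers size =>
      layers ++ [List.zipWith (fun g x => g ++ "#" ++ x) (layers.getLastD l)
        (PySem.List.slice l (some (size - 1)) none)]) [l]
  PySem.List.dedup layers.reverse.flatten

-- ===== PRECONDITION & SPEC =====
def Spec_get_3_gram (l : List String) (out : List String) : Prop := out = get_3_gram_alt l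
instance (l : List String) (out : List String) : Decidable (Spec_get_3_gram l out) := by unfold Spec_get_3_gram; infer_instance

-- ===== CLAIM (what is proved, stated in full; the proofs are below) =====
def Claim_equal_get_3_gram : Prop := ∀ (l : List String), Dom_get_3_gram l → Spec_get_3_gram l (get_3_gram l)

-- ===== LEMMAS AND PROOFS =====

-- the list of grams of window size i+1, in A's order
def pvGrams (l : List String) (i : Int) : List String :=
  (PySem.List.pyRange 0 ((l.length : Int) - i) 1).map (fun j =>
    (PySem.List.pyRange (j + 1) (j + i + 1) 1).foldl
      (fun s k => s ++ "#" ++ PySem.List.pyGetD l k "") (PySem.List.pyGetD l j ""))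

theorem pvLoopEq (l : List String) (i : Int) (ll : List String) :
    (if (l.length : Int) < i then ll
     else (PySem.List.pyRange 0 ((l.length : Int) - i) 1).foldl (fun ll j =>
        let s := (PySem.List.pyRange (j + 1) (j + i + 1) 1).foldl
          (fun s k => s ++ "#" ++ PySem.List.pyGetD l k "")
          (PySem.List.pyGetD l j "")
        if ll.contains s then ll else ll ++ [s]) ll)
    = (pvGrams l i).foldl (fun ll s => if ll.contains s then ll else ll ++ [s]) ll := by
  unfold pvGrams
  split
  · rw [PySem.List.pyRange_one_eq_nil (by omega)]; rfl
  · rw [List.foldl_map]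

-- A's on-the-fly dedup fold is PySem.List.dedup
theorem pvFoldDedup (xs : List String) :
    xs.foldl (fun ll s => if ll.contains s then ll else ll ++ [s]) [] = PySem.List.dedup xs := by
  simp only [PySem.List.dedup_eq_ofList, PySem.Set.ofList_eq_foldl]
  apply PySem.List.foldl_congr_mem
  intro acc x _
  simp [PySem.Set.add, PySem.Set.contains]

theorem pvGramsLen (l : List String) (i : Nat) :
    (pvGrams l (i : Int)).length = l.length - i := by
  unfold pvGrams
  rw [List.length_map, PySem.List.length_pyRange_one]
  omega

-- size-1 grams are the raw elements
theorem pvGramsZero (l : List String) : pvGrams l 0 = l := by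
  unfold pvGrams
  have h : ∀ j : Int, (PySem.List.pyRange (j + 1) (j + 0 + 1) 1) = [] := by
    intro j; exact PySem.List.pyRange_one_eq_nil (by omega)
  calc (PySem.List.pyRange 0 ((l.length : Int) - 0) 1).map (fun j =>
          (PySem.List.pyRange (j + 1) (j + 0 + 1) 1).foldl
            (fun s k => s ++ "#" ++ PySem.List.pyGetD l k "") (PySem.List.pyGetD l j ""))
      = (PySem.List.pyRange 0 ((l.length : Int)) 1).map (fun j => PySem.List.pyGetD l j "") := by
        rw [sub_zero]
        apply List.map_congr_left
        intro j _
        rw [h j, List.foldl_nil]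
    _ = l := PySem.List.map_pyGetD_pyRange_zero l ""

-- the zip recurrence: extending each size-(i+1) gram by one element gives the size-(i+2) grams
theorem pvGramsSucc (l : List String) (i : Nat) :
    pvGrams l (((i + 1 : Nat)) : Int)
      = List.zipWith (fun g x => g ++ "#" ++ x) (pvGrams l (i : Int)) (l.drop (i + 1)) := by
  apply List.ext_getElem
  · rw [pvGramsLen, List.length_zipWith, pvGramsLen, List.length_drop]; omega
  · intro k h1 h2
    have hk : k < l.length - (i + 1) := by rw [pvGramsLen] at h1; omega
    have hkd : k < (l.drop (i + 1)).length := by rw [List.length_drop]; omega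
    have hki : k < (pvGrams l (i : Int)).length := by rw [pvGramsLen]; omega
    rw [List.getElem_zipWith]
    unfold pvGrams
    rw [List.getElem_map, List.getElem_map, PySem.List.getElem_pyRange_one,
      PySem.List.getElem_pyRange_one]
    simp only [zero_add]
    have hsp : (k : Int) + ((i + 1 : Nat) : Int) + 1 = ((k : Int) + (i : Int) + 1) + 1 := by
      push_cast; ring
    rw [hsp, PySem.List.pyRange_one_succ_right (by omega), List.foldl_append, List.foldl_cons,
      List.foldl_nil]
    have hidx : (k : Int) + (i : Int) + 1 = ((i + 1 + k : Nat) : Int) := by push_cast; ring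
    rw [hidx, List.getElem_drop]
    congr 1
    rw [PySem.List.pyGetD_natCast]
    exact List.getD_eq_getElem _ _ (by omega)

-- ===== VERDICT (by name: the statement is the Claim_ definition above) =====
theorem get_3_gram_spec : Claim_equal_get_3_gram := by
  intro l _
  show get_3_gram l = get_3_gram_alt l
  unfold get_3_gram get_3_gram_alt
  have e2 : ((2 : Int) - 1) = ((1 : Nat) : Int) := by norm_num
  have e3 : ((3 : Int) - 1) = ((2 : Nat) : Int) := by norm_num
  have e4 : ((4 : Int) - 1) = ((3 : Nat) : Int) := by norm_num
  simp only [List.foldl_cons, List.foldl_nil, List.getLastD_cons, List.nil_append,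
    List.cons_append, List.reverse_cons, List.reverse_nil, List.flatten_cons, List.flatten_nil,
    List.append_nil, e2, e3, e4, PySem.List.slice_from_natCast]
  rw [pvLoopEq, pvLoopEq, pvLoopEq, pvLoopEq]
  rw [← List.foldl_append, ← List.foldl_append, ← List.foldl_append]
  rw [pvFoldDedup]
  have g1 : pvGrams l 1 = List.zipWith (fun g x => g ++ "#" ++ x) l (l.drop 1) := by
    have := pvGramsSucc l 0
    simpa [pvGramsZero] using this
  have g2 : pvGrams l 2 = List.zipWith (fun g x => g ++ "#" ++ x) (pvGrams l 1) (l.drop 2) := by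
    have := pvGramsSucc l 1
    simpa using this
  have g3 : pvGrams l 3 = List.zipWith (fun g x => g ++ "#" ++ x) (pvGrams l 2) (l.drop 3) := by
    have := pvGramsSucc l 2
    simpa using this
  rw [g3, g2, g1, pvGramsZero]
  simp
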